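-- pv_equiv track=rewrite | github.com/haolunc/ARC-RL | reference_solutions/solutions/7f4411dc.py | transform
-- ===== SOURCE A (Python) =====
-- def transform(grid):
--
--     h = len(grid)
--     w = len(grid[0]) if h else 0
--
--     out = [[0 for _ in range(w)] for _ in range(h)]
--
--     colours = {grid[i][j] for i in range(h) for j in range(w) if grid[i][j] != 0}
--
--     for col in colours:
--
--         for r1 in range(h - 1):
--             for c1 in range(w - 1):
--                 for r2 in range(r1 + 1, h):
--                     for c2 in range(c1 + 1, w):
--
--                         if (grid[r1][c1] != col or grid[r1][c2] != col or
--                             grid[r2][c1] != col or grid[r2][c2] != col):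
--                             continue
--
--                         ok = True
--                         for i in range(r1, r2 + 1):
--                             for j in range(c1, c2 + 1):
--                                 if grid[i][j] != col:
--                                     ok = False
--                                     break
--                             if not ok:
--                                 break
--
--                         if ok:
--
--                             for i in range(r1, r2 + 1):
--                                 for j in range(c1, c2 + 1):
--                                     out[i][j] = col
--
--     return out
-- ===== SOURCE B (Python) =====
-- def transform(grid):
--     # Scan all 2x2 blocks once; a cell lies in some solid monochromatic
--     # rectangle (>=2x2) iff it lies in a solid monochromatic 2x2 block.
--     h = len(grid)
--     w = len(grid[0]) if h else 0
--     out = [[0] * w for _ in range(h)]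
--     for i in range(h - 1):
--         for j in range(w - 1):
--             v = grid[i][j]
--             if v != 0 and grid[i][j + 1] == v and grid[i + 1][j] == v and grid[i + 1][j + 1] == v:
--                 out[i][j] = v
--                 out[i][j + 1] = v
--                 out[i + 1][j] = v
--                 out[i + 1][j + 1] = v
--     return out
-- ===== Notes on version B (the rewrite author's own statement) =====
-- stated objective: faster
-- what changed: Replaces the per-colour enumeration of all rectangles (with a full solidity re-scan and re-paint per rectangle) by a single pass over all 2x2 blocks, painting each fully-monochromatic non-zero block: a cell lies in a solid monochromatic rectangle iff it lies in such a 2x2 block.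
import Mathlib
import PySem

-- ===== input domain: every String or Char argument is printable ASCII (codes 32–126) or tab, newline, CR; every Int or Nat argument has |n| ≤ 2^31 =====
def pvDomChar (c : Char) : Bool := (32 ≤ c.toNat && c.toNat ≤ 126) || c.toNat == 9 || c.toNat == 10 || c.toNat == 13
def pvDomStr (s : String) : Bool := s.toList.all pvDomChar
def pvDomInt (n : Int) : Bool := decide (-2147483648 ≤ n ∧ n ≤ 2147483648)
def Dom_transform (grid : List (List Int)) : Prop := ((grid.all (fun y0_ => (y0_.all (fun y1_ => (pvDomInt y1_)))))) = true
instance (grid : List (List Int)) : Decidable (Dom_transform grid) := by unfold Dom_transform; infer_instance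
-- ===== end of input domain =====

-- B replaces A's per-colour enumeration of all rectangles (each re-checked for
-- solidity and re-painted cell by cell) by a single pass over all 2x2 blocks,
-- painting each fully monochromatic non-zero block: a cell lies in a solid
-- monochromatic rectangle (at least 2x2 in both directions) iff it lies in
-- such a 2x2 block.

-- shared cell primitives: grid[i][j] and out[i][j] = v (indices are in range
-- wherever the ports read/write them under Pre_, so the getD default is never returned)

def getC (g : List (List Int)) (i j : Nat) : Int := (g.getD i []).getD j 0

def setC (o : List (List Int)) (i j : Nat) (v : Int) : List (List Int) :=
  o.set i ((o.getD i []).set j v)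

def paintRect (o : List (List Int)) (r1 c1 r2 c2 : Nat) (v : Int) : List (List Int) :=
  (List.range' r1 (r2 + 1 - r1)).foldl (fun o i =>
    (List.range' c1 (c2 + 1 - c1)).foldl (fun o j => setC o i j v) o) o

def solidA (g : List (List Int)) (col : Int) (r1 c1 r2 c2 : Nat) : Bool :=
  (List.range' r1 (r2 + 1 - r1)).all (fun i =>
    (List.range' c1 (c2 + 1 - c1)).all (fun j => getC g i j == col))

-- ===== PORT A =====
def transform (grid : List (List Int)) : List (List Int) :=
  let h := grid.length
  let w := if h = 0 then 0 else (grid.headD []).length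
  let out : List (List Int) := List.replicate h (List.replicate w 0)
  let colours : PySem.Set Int := PySem.Set.ofList
    ((List.range h).flatMap (fun i => (List.range w).filterMap (fun j =>
      if getC grid i j ≠ 0 then some (getC grid i j) else none)))
  colours.foldl (fun out col =>
    (List.range (h - 1)).foldl (fun out r1 =>
      (List.range (w - 1)).foldl (fun out c1 =>
        (List.range' (r1 + 1) (h - (r1 + 1))).foldl (fun out r2 =>
          (List.range' (c1 + 1) (w - (c1 + 1))).foldl (fun out c2 =>
            if getC grid r1 c1 == col && getC grid r1 c2 == col &&
               getC grid r2 c1 == col && getC grid r2 c2 == col then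
              if solidA grid col r1 c1 r2 c2 then paintRect out r1 c1 r2 c2 col
              else out
            else out) out) out) out) out) out

-- ===== PORT B =====
def transform_alt (grid : List (List Int)) : List (List Int) :=
  let h := grid.length
  let w := if h = 0 then 0 else (grid.headD []).length
  (List.range (h - 1)).foldl (fun out i =>
    (List.range (w - 1)).foldl (fun out j =>
      let v := getC grid i j
      if v ≠ 0 ∧ getC grid i (j + 1) = v ∧ getC grid (i + 1) j = v ∧
         getC grid (i + 1) (j + 1) = v then
        setC (setC (setC (setC out i j v) i (j + 1) v) (i + 1) j v) (i + 1) (j + 1) v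
      else out) out) (List.replicate h (List.replicate w 0))

-- ===== PRECONDITION & SPEC =====
-- Pre_ excludes exactly the ragged grids having a row shorter than row 0, on which
-- the Python A raises IndexError (it indexes every row at all columns < len(grid[0])).
def Pre_transform (grid : List (List Int)) : Prop :=
  ∀ row ∈ grid, (grid.headD []).length ≤ row.length
instance (grid : List (List Int)) : Decidable (Pre_transform grid) := by
  unfold Pre_transform; infer_instance
def pvWitness_transform : List (List Int) := [[1, 1, 0], [1, 1, 2]]

def Spec_transform (grid : List (List Int)) (out : List (List Int)) : Prop := out = transform_alt grid
instance (grid : List (List Int)) (out : List (List Int)) : Decidable (Spec_transform grid out) := by unfold Spec_transform; infer_instance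

-- ===== CLAIM (what is proved, stated in full; the proofs are below) =====
def Claim_equal_transform : Prop := ∀ (grid : List (List Int)), Dom_transform grid → Pre_transform grid → Spec_transform grid (transform grid)

-- ===== LEMMAS AND PROOFS =====

def shapeOk (h w : Nat) (o : List (List Int)) : Prop :=
  o.length = h ∧ ∀ k, (hk : k < o.length) → o[k].length = w

lemma shape_setC {h w : Nat} {o : List (List Int)} (hs : shapeOk h w o)
    (i j : Nat) (v : Int) : shapeOk h w (setC o i j v) := by
  obtain ⟨h1, h2⟩ := hs
  constructor
  · simpa [setC] using h1
  · intro k hk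
    simp only [setC, List.length_set] at hk
    by_cases hik : i = k
    · subst hik
      simp [setC, List.getD_eq_getElem?_getD, List.getElem?_eq_getElem hk, h2 _ hk]
    · simp [setC, hik, h2 _ hk]

lemma getC_setC {h w : Nat} {o : List (List Int)} (hs : shapeOk h w o)
    {i j : Nat} (hi : i < h) (hj : j < w) (v : Int) (i' j' : Nat) :
    getC (setC o i j v) i' j' = if i' = i ∧ j' = j then v else getC o i' j' := by
  obtain ⟨h1, h2⟩ := hs
  have hlen : i < o.length := h1 ▸ hi
  have hrow : (o.getD i []).length = w := by
    simp [List.getD_eq_getElem?_getD, List.getElem?_eq_getElem hlen, h2 i hlen]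
  by_cases hii : i' = i
  · subst hii
    simp only [getC, setC, List.getD_eq_getElem?_getD,
      List.getElem?_set_self hlen, Option.getD_some]
    by_cases hjj : j' = j
    · subst hjj
      have hr2 : j' < (o[i']?.getD []).length := by
        rw [← List.getD_eq_getElem?_getD, hrow]; exact hj
      simp [List.getElem?_set_self hr2]
    · simp [List.getElem?_set_ne (by omega : j ≠ j'), hjj]
  · simp [getC, setC, List.getD_eq_getElem?_getD,
      List.getElem?_set_ne (by omega : i ≠ i'), hii]

lemma getC_replicate (h w i j : Nat) :
    getC (List.replicate h (List.replicate w (0 : Int))) i j = 0 := by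
  simp only [getC, List.getD_eq_getElem?_getD, List.getElem?_replicate]
  split <;> simp

abbrev inRect (r1 c1 r2 c2 i j : Nat) : Prop := r1 ≤ i ∧ i ≤ r2 ∧ c1 ≤ j ∧ j ≤ c2

lemma shape_foldl {σ : Type} {h w : Nat} (step : List (List Int) → σ → List (List Int))
    (hstep : ∀ o s, shapeOk h w o → shapeOk h w (step o s)) :
    ∀ (L : List σ) (o : List (List Int)), shapeOk h w o → shapeOk h w (L.foldl step o) := by
  intro L
  induction L with
  | nil => intro o hs; exact hs
  | cons a L ih => intro o hs; exact ih _ (hstep o a hs)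

lemma shape_paintRect {h w : Nat} {o : List (List Int)} (hs : shapeOk h w o)
    (r1 c1 r2 c2 : Nat) (v : Int) : shapeOk h w (paintRect o r1 c1 r2 c2 v) := by
  unfold paintRect
  exact shape_foldl _ (fun o i hso =>
    shape_foldl _ (fun o' j hso' => shape_setC hso' i j v) _ o hso) _ o hs

lemma getC_row_fold {h w : Nat} {o : List (List Int)} (hs : shapeOk h w o)
    {a : Nat} (ha : a < h) {c1 m : Nat} (hm : c1 + m ≤ w) (v : Int) (i j : Nat) :
    getC ((List.range' c1 m).foldl (fun o j' => setC o a j' v) o) i j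
      = if i = a ∧ c1 ≤ j ∧ j < c1 + m then v else getC o i j := by
  induction m generalizing c1 o with
  | zero =>
    simp only [List.range'_zero, List.foldl_nil]
    split
    · omega
    · rfl
  | succ m ih =>
    rw [List.range'_succ, List.foldl_cons]
    rw [ih (shape_setC hs a c1 v) (by omega)]
    rw [getC_setC hs ha (by omega) v i j]
    split_ifs <;> first | rfl | omega

lemma getC_rows_fold {h w : Nat} {o : List (List Int)} (hs : shapeOk h w o)
    {r1 n : Nat} (hn : r1 + n ≤ h) {c1 m : Nat} (hm : c1 + m ≤ w) (v : Int) (i j : Nat) :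
    getC ((List.range' r1 n).foldl (fun o a =>
        (List.range' c1 m).foldl (fun o j' => setC o a j' v) o) o) i j
      = if r1 ≤ i ∧ i < r1 + n ∧ c1 ≤ j ∧ j < c1 + m then v else getC o i j := by
  induction n generalizing r1 o with
  | zero =>
    simp only [List.range'_zero, List.foldl_nil]
    split
    · omega
    · rfl
  | succ n ih =>
    rw [List.range'_succ, List.foldl_cons]
    have hs' : shapeOk h w ((List.range' c1 m).foldl (fun o j' => setC o r1 j' v) o) :=
      shape_foldl _ (fun o' j' hso' => shape_setC hso' r1 j' v) _ o hs
    rw [ih hs' (by omega)]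
    rw [getC_row_fold hs (by omega) hm v i j]
    split_ifs <;> first | rfl | omega

lemma getC_paintRect {h w : Nat} {o : List (List Int)} (hs : shapeOk h w o)
    {r1 c1 r2 c2 : Nat} (hr : r2 < h) (hc : c2 < w) (v : Int) (i j : Nat) :
    getC (paintRect o r1 c1 r2 c2 v) i j =
      if inRect r1 c1 r2 c2 i j then v else getC o i j := by
  unfold paintRect
  by_cases h1 : r1 ≤ r2
  · by_cases h2 : c1 ≤ c2
    · rw [getC_rows_fold hs (by omega) (by omega) v i j]
      unfold inRect
      split_ifs <;> first | rfl | omega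
    · have : c2 + 1 - c1 = 0 := by omega
      simp only [this, List.range'_zero, List.foldl_nil]
      have hid : ∀ (L : List Nat) (o' : List (List Int)),
          L.foldl (fun o (_ : Nat) => o) o' = o' := by
        intro L; induction L with
        | nil => intro o'; rfl
        | cons a L ih => intro o'; simp [ih o']
      rw [hid]
      rw [if_neg (by unfold inRect; omega)]
  · have : r2 + 1 - r1 = 0 := by omega
    simp only [this, List.range'_zero, List.foldl_nil]
    rw [if_neg (by unfold inRect; omega)]

lemma getC_foldl_ops {σ : Type} {h w : Nat} (ops : List σ)
    (cond : σ → Prop) [DecidablePred cond] (r1f c1f r2f c2f : σ → Nat) (cv : σ → Int)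
    (f : Nat → Nat → Int)
    (hgood : ∀ s ∈ ops, cond s → r2f s < h ∧ c2f s < w ∧
      ∀ i j, inRect (r1f s) (c1f s) (r2f s) (c2f s) i j → cv s = f i j)
    {o : List (List Int)} (hs : shapeOk h w o) (i j : Nat) :
    getC (ops.foldl (fun o s =>
      if cond s then paintRect o (r1f s) (c1f s) (r2f s) (c2f s) (cv s) else o) o) i j
    = if ∃ s ∈ ops, cond s ∧ inRect (r1f s) (c1f s) (r2f s) (c2f s) i j
      then f i j else getC o i j := by
  induction ops generalizing o with
  | nil => simp
  | cons s ops ih =>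
    have hgood' : ∀ s' ∈ ops, cond s' → r2f s' < h ∧ c2f s' < w ∧
        ∀ i j, inRect (r1f s') (c1f s') (r2f s') (c2f s') i j → cv s' = f i j :=
      fun s' hm => hgood s' (List.mem_cons_of_mem _ hm)
    simp only [List.foldl_cons]
    by_cases hc : cond s
    · rw [if_pos hc]
      obtain ⟨hr2, hc2, hval⟩ := hgood s List.mem_cons_self hc
      rw [ih hgood' (shape_paintRect hs _ _ _ _ _)]
      rw [getC_paintRect hs hr2 hc2 _ i j]
      by_cases hex : ∃ s' ∈ ops, cond s' ∧ inRect (r1f s') (c1f s') (r2f s') (c2f s') i j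
      · obtain ⟨s', hm, hc', hr⟩ := hex
        rw [if_pos ⟨s', hm, hc', hr⟩, if_pos ⟨s', List.mem_cons_of_mem _ hm, hc', hr⟩]
      · rw [if_neg hex]
        by_cases hcov : inRect (r1f s) (c1f s) (r2f s) (c2f s) i j
        · rw [if_pos hcov, if_pos ⟨s, List.mem_cons_self, hc, hcov⟩]
          exact hval i j hcov
        · rw [if_neg hcov, if_neg]
          rintro ⟨s', hm, hc', hr⟩
          rcases List.mem_cons.mp hm with rfl | hm'
          · exact hcov hr
          · exact hex ⟨s', hm', hc', hr⟩
    · rw [if_neg hc]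
      rw [ih hgood' hs]
      congr 1
      simp only [List.mem_cons, eq_iff_iff]
      constructor
      · rintro ⟨s', hm, hc', hr⟩; exact ⟨s', Or.inr hm, hc', hr⟩
      · rintro ⟨s', hm, hc', hr⟩
        rcases hm with rfl | hm
        · exact absurd hc' hc
        · exact ⟨s', hm, hc', hr⟩

lemma foldl_foldl_flatMap {α β σ : Type} (L : List α) (M : α → List β)
    (f : σ → α → β → σ) (s : σ) :
    L.foldl (fun s a => (M a).foldl (fun s b => f s a b) s) s
      = (L.flatMap (fun a => (M a).map (fun b => (a, b)))).foldl
          (fun s p => f s p.1 p.2) s := by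
  induction L generalizing s with
  | nil => rfl
  | cons a L ih => simp [List.foldl_append, List.foldl_map, ih]

def W (g : List (List Int)) : Nat := if g.length = 0 then 0 else (g.headD []).length

def coloursL (g : List (List Int)) : List Int := PySem.Set.ofList
  (List.flatMap
    (fun i => List.filterMap (fun j => if getC g i j ≠ 0 then some (getC g i j) else none)
      (List.range (W g)))
    (List.range g.length))

def opsA (g : List (List Int)) : List (Int × Nat × Nat × Nat × Nat) :=
  List.flatMap
    (fun a => List.map (fun b => (a, b))
      (List.flatMap
        (fun a => List.map (fun b => (a, b))
          (List.flatMap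
            (fun a_1 => List.map (fun b => (a_1, b))
              (List.flatMap
                (fun a => List.map (fun b => (a, b))
                  (List.range' (a_1 + 1) (W g - (a_1 + 1))))
                (List.range' (a + 1) (g.length - (a + 1)))))
            (List.range (W g - 1))))
        (List.range (g.length - 1))))
    (coloursL g)

abbrev condA (g : List (List Int)) (p : Int × Nat × Nat × Nat × Nat) : Prop :=
  (getC g p.2.1 p.2.2.1 == p.1 && getC g p.2.1 p.2.2.2.2 == p.1 &&
   getC g p.2.2.2.1 p.2.2.1 == p.1 && getC g p.2.2.2.1 p.2.2.2.2 == p.1) = true ∧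
  solidA g p.1 p.2.1 p.2.2.1 p.2.2.2.1 p.2.2.2.2 = true

def opsB (g : List (List Int)) : List (Nat × Nat) :=
  List.flatMap (fun a => List.map (fun b => (a, b)) (List.range (W g - 1)))
    (List.range (g.length - 1))

abbrev condB (g : List (List Int)) (p : Nat × Nat) : Prop :=
  getC g p.1 p.2 ≠ 0 ∧ getC g p.1 (p.2 + 1) = getC g p.1 p.2 ∧
  getC g (p.1 + 1) p.2 = getC g p.1 p.2 ∧ getC g (p.1 + 1) (p.2 + 1) = getC g p.1 p.2

lemma transform_eq_fold (g : List (List Int)) :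
    transform g = (opsA g).foldl
      (fun o s => if condA g s then paintRect o s.2.1 s.2.2.1 s.2.2.2.1 s.2.2.2.2 s.1 else o)
      (List.replicate g.length (List.replicate (W g) 0)) := by
  simp only [transform, foldl_foldl_flatMap]
  unfold opsA coloursL W
  congr 1
  funext o p
  by_cases h1 : (getC g p.2.1 p.2.2.1 == p.1 && getC g p.2.1 p.2.2.2.2 == p.1 &&
      getC g p.2.2.2.1 p.2.2.1 == p.1 && getC g p.2.2.2.1 p.2.2.2.2 == p.1) = true
  · by_cases h2 : solidA g p.1 p.2.1 p.2.2.1 p.2.2.2.1 p.2.2.2.2 = true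
    · simp [h1, h2, condA]
    · simp [h1, h2, condA]
  · simp [h1, condA]

lemma paint2x2 (o : List (List Int)) (i j : Nat) (v : Int) :
    paintRect o i j (i + 1) (j + 1) v
      = setC (setC (setC (setC o i j v) i (j + 1) v) (i + 1) j v) (i + 1) (j + 1) v := by
  unfold paintRect
  have h1 : i + 1 + 1 - i = 2 := by omega
  have h2 : j + 1 + 1 - j = 2 := by omega
  rw [h1, h2]
  simp [List.range'_succ]

lemma transform_alt_eq_fold (g : List (List Int)) :
    transform_alt g = (opsB g).foldl
      (fun o s => if condB g s then paintRect o s.1 s.2 (s.1 + 1) (s.2 + 1) (getC g s.1 s.2) else o)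
      (List.replicate g.length (List.replicate (W g) 0)) := by
  simp only [transform_alt, foldl_foldl_flatMap]
  unfold opsB W
  congr 1
  funext o p
  by_cases h1 : condB g p
  · rw [if_pos, if_pos h1, paint2x2]
    · exact h1
  · rw [if_neg, if_neg h1]
    · exact h1

abbrev PA (g : List (List Int)) (i j : Nat) : Prop :=
  ∃ s ∈ opsA g, condA g s ∧ inRect s.2.1 s.2.2.1 s.2.2.2.1 s.2.2.2.2 i j

abbrev PB (g : List (List Int)) (i j : Nat) : Prop :=
  ∃ s ∈ opsB g, condB g s ∧ inRect s.1 s.2 (s.1 + 1) (s.2 + 1) i j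

lemma shape_replicate (h w : Nat) :
    shapeOk h w (List.replicate h (List.replicate w (0 : Int))) := by
  constructor
  · simp
  · intro k hk; simp

lemma getC_transform (g : List (List Int)) (i j : Nat) :
    getC (transform g) i j = if PA g i j then getC g i j else 0 := by
  rw [transform_eq_fold]
  rw [getC_foldl_ops (opsA g) (condA g) (fun s => s.2.1) (fun s => s.2.2.1)
        (fun s => s.2.2.2.1) (fun s => s.2.2.2.2) (fun s => s.1) (getC g) ?hgood
        (shape_replicate g.length (W g)) i j]
  · rw [getC_replicate]
  case hgood =>
    intro s hm hc
    simp only [opsA, List.mem_flatMap, List.mem_map] at hm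
    obtain ⟨col, hcol, s2, ⟨r1, hr1, s3, ⟨c1, hc1, s4, ⟨r2, hr2, c2, hc2, rfl⟩, rfl⟩, rfl⟩, rfl⟩ := hm
    have hr1' := List.mem_range.mp hr1
    have hc1' := List.mem_range.mp hc1
    have hr2' := List.mem_range'_1.mp hr2
    have hc2' := List.mem_range'_1.mp hc2
    refine ⟨by dsimp only; omega, by dsimp only; omega, ?_⟩
    intro i j hij
    simp only [inRect] at hij
    have hsol := hc.2
    simp only [solidA, List.all_eq_true, beq_iff_eq] at hsol
    dsimp only at hsol hij ⊢
    exact (hsol i (List.mem_range'_1.mpr ⟨by omega, by omega⟩)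
      j (List.mem_range'_1.mpr ⟨by omega, by omega⟩)).symm

lemma getC_transform_alt (g : List (List Int)) (i j : Nat) :
    getC (transform_alt g) i j = if PB g i j then getC g i j else 0 := by
  rw [transform_alt_eq_fold]
  rw [getC_foldl_ops (opsB g) (condB g) (fun s => s.1) (fun s => s.2)
        (fun s => s.1 + 1) (fun s => s.2 + 1) (fun s => getC g s.1 s.2) (getC g) ?hgood
        (shape_replicate g.length (W g)) i j]
  · rw [getC_replicate]
  case hgood =>
    intro s hm hc
    simp only [opsB, List.mem_flatMap, List.mem_map] at hm
    obtain ⟨a, ha, b, hb, rfl⟩ := hm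
    have ha' := List.mem_range.mp ha
    have hb' := List.mem_range.mp hb
    obtain ⟨hv, e1, e2, e3⟩ := hc
    dsimp only at hv e1 e2 e3
    refine ⟨by dsimp only; omega, by dsimp only; omega, ?_⟩
    intro i j hij
    simp only [inRect] at hij
    dsimp only at hij ⊢
    have hcase : (i = a ∨ i = a + 1) ∧ (j = b ∨ j = b + 1) := by omega
    rcases hcase with ⟨rfl | rfl, rfl | rfl⟩ <;> simp [e1, e2, e3]

lemma mem_coloursL {g : List (List Int)} {a b : Nat} (ha : a < g.length) (hb : b < W g)
    (hv : getC g a b ≠ 0) : getC g a b ∈ coloursL g := by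
  unfold coloursL
  rw [PySem.Set.mem_ofList]
  simp only [List.mem_flatMap, List.mem_filterMap, List.mem_range]
  exact ⟨a, ha, b, ⟨hb, by simp [hv]⟩⟩

lemma coloursL_ne_zero {g : List (List Int)} {col : Int} (h : col ∈ coloursL g) :
    col ≠ 0 := by
  unfold coloursL at h
  rw [PySem.Set.mem_ofList] at h
  simp only [List.mem_flatMap, List.mem_filterMap, List.mem_range] at h
  obtain ⟨a, ha, b, hb, he⟩ := h
  split at he
  · cases he; assumption
  · cases he

lemma PA_iff_PB (g : List (List Int)) (i j : Nat) : PA g i j ↔ PB g i j := by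
  constructor
  · rintro ⟨s, hm, hc, hcov⟩
    simp only [opsA, List.mem_flatMap, List.mem_map] at hm
    obtain ⟨col, hcol, s2, ⟨r1, hr1, s3, ⟨c1, hc1, s4, ⟨r2, hr2, c2, hc2, rfl⟩, rfl⟩, rfl⟩, rfl⟩ := hm
    have hr1' := List.mem_range.mp hr1
    have hc1' := List.mem_range.mp hc1
    have hr2' := List.mem_range'_1.mp hr2
    have hc2' := List.mem_range'_1.mp hc2
    simp only [inRect] at hcov
    have hsol := hc.2
    simp only [solidA, List.all_eq_true, beq_iff_eq] at hsol
    have hcell : ∀ x y, r1 ≤ x → x ≤ r2 → c1 ≤ y → y ≤ c2 → getC g x y = col := by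
      intro x y h1 h2 h3 h4
      exact hsol x (List.mem_range'_1.mpr ⟨by omega, by omega⟩)
        y (List.mem_range'_1.mpr ⟨by omega, by omega⟩)
    have hcne := coloursL_ne_zero hcol
    refine ⟨(min i (r2 - 1), min j (c2 - 1)), ?_, ?_, ?_⟩
    · simp only [opsB, List.mem_flatMap, List.mem_map, List.mem_range]
      exact ⟨min i (r2 - 1), by omega, min j (c2 - 1), by omega, rfl⟩
    · have e0 : getC g (min i (r2 - 1)) (min j (c2 - 1)) = col :=
        hcell _ _ (by omega) (by omega) (by omega) (by omega)
      refine ⟨?_, ?_, ?_, ?_⟩ <;> dsimp only <;>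
        rw [e0] <;>
        first
          | exact hcne
          | exact hcell _ _ (by omega) (by omega) (by omega) (by omega)
    · simp only [inRect]; omega
  · rintro ⟨s, hm, hc, hcov⟩
    simp only [opsB, List.mem_flatMap, List.mem_map, List.mem_range] at hm
    obtain ⟨a, ha, b, hb, rfl⟩ := hm
    obtain ⟨hv, e1, e2, e3⟩ := hc
    dsimp only at hv e1 e2 e3
    simp only [inRect] at hcov
    have hcol : getC g a b ∈ coloursL g :=
      mem_coloursL (by omega) (by omega) hv
    refine ⟨(getC g a b, a, b, a + 1, b + 1), ?_, ⟨?_, ?_⟩, ?_⟩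
    · simp only [opsA, List.mem_flatMap, List.mem_map]
      exact ⟨getC g a b, hcol, _, ⟨a, List.mem_range.mpr (by omega), _,
        ⟨b, List.mem_range.mpr (by omega), _,
          ⟨a + 1, List.mem_range'_1.mpr ⟨by omega, by omega⟩,
           b + 1, List.mem_range'_1.mpr ⟨by omega, by omega⟩, rfl⟩, rfl⟩, rfl⟩, rfl⟩
    · dsimp only; simp [e1, e2, e3]
    · dsimp only
      simp only [solidA, List.all_eq_true]
      intro x hx y hy
      have hx' := List.mem_range'_1.mp hx
      have hy' := List.mem_range'_1.mp hy
      have hcase : (x = a ∨ x = a + 1) ∧ (y = b ∨ y = b + 1) := by omega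
      rcases hcase with ⟨rfl | rfl, rfl | rfl⟩ <;> simp [e1, e2, e3]
    · simp only [inRect]; omega

lemma shape_transform (g : List (List Int)) :
    shapeOk g.length (W g) (transform g) := by
  rw [transform_eq_fold]
  refine shape_foldl _ ?_ _ _ (shape_replicate g.length (W g))
  intro o s hs
  split
  · exact shape_paintRect hs _ _ _ _ _
  · exact hs

lemma shape_transform_alt (g : List (List Int)) :
    shapeOk g.length (W g) (transform_alt g) := by
  rw [transform_alt_eq_fold]
  refine shape_foldl _ ?_ _ _ (shape_replicate g.length (W g))
  intro o s hs
  split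
  · exact shape_paintRect hs _ _ _ _ _
  · exact hs

lemma getElem_eq_getC {o : List (List Int)} {i j : Nat}
    (hi : i < o.length) (hj : j < o[i].length) : o[i][j] = getC o i j := by
  simp [getC, List.getD_eq_getElem?_getD, List.getElem?_eq_getElem hi,
    List.getElem?_eq_getElem hj]

theorem transform_main (g : List (List Int)) : transform g = transform_alt g := by
  have s1 := shape_transform g
  have s2 := shape_transform_alt g
  apply List.ext_getElem (by rw [s1.1, s2.1])
  intro i hi1 hi2
  apply List.ext_getElem (by rw [s1.2 i hi1, s2.2 i hi2])
  intro j hj1 hj2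
  rw [getElem_eq_getC hi1 hj1, getElem_eq_getC hi2 hj2]
  rw [getC_transform, getC_transform_alt]
  exact if_congr (PA_iff_PB g i j) rfl rfl

-- ===== VERDICT (by name: the statement is the Claim_ definition above) =====
theorem transform_spec : Claim_equal_transform := by
  intro grid _ _
  show transform grid = transform_alt grid
  exact transform_main grid
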